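-- pv_equiv track=rewrite | github.com/bloomberg/chromium.bb | mojo/public/bindings/parser/mojo_translate.py | MapKind
-- ===== SOURCE A (Python) =====
-- def MapKind(kind):
--   map_to_kind = { 'bool': 'b',
--                   'int8': 'i8',
--                   'int16': 'i16',
--                   'int32': 'i32',
--                   'int64': 'i64',
--                   'uint8': 'u8',
--                   'uint16': 'u16',
--                   'uint32': 'u32',
--                   'uint64': 'u64',
--                   'float': 'f',
--                   'double': 'd',
--                   'string': 's',
--                   'handle': 'h' }
--   if kind.endswith('[]'):
--     return 'a:' + MapKind(kind[0:len(kind)-2])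
--   if kind in map_to_kind:
--     return map_to_kind[kind]
--   return 'x:' + kind
-- ===== SOURCE B (Python) =====
-- _MAP = {'bool': 'b',
--         'int8': 'i8',
--         'int16': 'i16',
--         'int32': 'i32',
--         'int64': 'i64',
--         'uint8': 'u8',
--         'uint16': 'u16',
--         'uint32': 'u32',
--         'uint64': 'u64',
--         'float': 'f',
--         'double': 'd',
--         'string': 's',
--         'handle': 'h'}
--
-- def MapKind(kind):
--   count = 0
--   while kind.endswith('[]'):
--     kind = kind[0:len(kind) - 2]
--     count += 1
--   return 'a:' * count + _MAP.get(kind, 'x:' + kind)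
-- ===== Notes on version B (the rewrite author's own statement) =====
-- stated objective: simpler
-- what changed: Replaces A's self-recursion (one call per trailing bracket pair, rebuilding the dict literal on every call) with an iterative loop that counts the trailing bracket pairs, then a single lookup in a module-level dict with the fallback prefix, joined by one string-repetition concatenation.
import Mathlib
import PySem

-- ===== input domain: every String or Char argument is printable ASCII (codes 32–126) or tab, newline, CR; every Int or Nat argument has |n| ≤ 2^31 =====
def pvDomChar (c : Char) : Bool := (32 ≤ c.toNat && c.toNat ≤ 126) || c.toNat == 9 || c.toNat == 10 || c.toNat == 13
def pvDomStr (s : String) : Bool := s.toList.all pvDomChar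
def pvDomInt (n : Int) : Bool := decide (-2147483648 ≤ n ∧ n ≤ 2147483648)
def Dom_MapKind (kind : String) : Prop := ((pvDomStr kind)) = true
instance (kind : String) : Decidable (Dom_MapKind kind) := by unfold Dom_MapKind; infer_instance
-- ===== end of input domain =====

-- B differs from A only in decomposition: a loop counting trailing bracket pairs plus one
-- module-level dict lookup with the fallback prefix, instead of A's self-recursion.

-- the literal key→code table both Pythons carry (A as a local dict, B at module level)
def pvTable : List (List Char × List Char) :=
  [ ("bool".toList,   "b".toList),
    ("int8".toList,   "i8".toList),
    ("int16".toList,  "i16".toList),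
    ("int32".toList,  "i32".toList),
    ("int64".toList,  "i64".toList),
    ("uint8".toList,  "u8".toList),
    ("uint16".toList, "u16".toList),
    ("uint32".toList, "u32".toList),
    ("uint64".toList, "u64".toList),
    ("float".toList,  "f".toList),
    ("double".toList, "d".toList),
    ("string".toList, "s".toList),
    ("handle".toList, "h".toList) ]

-- ===== PORT A =====
-- A's recursion: strip a trailing bracket pair, prefix the array marker, recurse; else dict lookup / fallback
def mapKindAux (cs : List Char) : List Char :=
  if h : PySem.Chars.endswith cs ['[', ']'] = true then
    ['a', ':'] ++ mapKindAux (cs.take (cs.length - 2))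
  else
    match pvTable.lookup cs with
    | some v => v
    | none => ['x', ':'] ++ cs
termination_by cs.length
decreasing_by
  have h2 : 2 ≤ cs.length :=
    ((PySem.Chars.endswith_iff cs ['[', ']']).mp h).length_le
  simp [List.length_take]; omega

def MapKind (kind : String) : String := String.ofList (mapKindAux kind.toList)

-- ===== PORT B =====
-- B's while loop: chop trailing bracket pairs off the end, counting them
def stripLoop (cs : List Char) (count : Nat) : Nat × List Char :=
  if h : PySem.Chars.endswith cs ['[', ']'] = true then
    stripLoop (cs.take (cs.length - 2)) (count + 1)
  else (count, cs)
termination_by cs.length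
decreasing_by
  have h2 : 2 ≤ cs.length :=
    ((PySem.Chars.endswith_iff cs ['[', ']']).mp h).length_le
  simp [List.length_take]; omega

-- B's dict .get with the fallback prefix
def lookupB (base : List Char) : List Char :=
  match pvTable.lookup base with
  | some v => v
  | none => ['x', ':'] ++ base

def MapKind_alt (kind : String) : String :=
  String.ofList ((List.replicate (stripLoop kind.toList 0).1 ['a', ':']).flatten
    ++ lookupB (stripLoop kind.toList 0).2)

-- ===== PRECONDITION & SPEC =====
def Spec_MapKind (kind : String) (out : String) : Prop := out = MapKind_alt kind
instance (kind : String) (out : String) : Decidable (Spec_MapKind kind out) := by unfold Spec_MapKind; infer_instance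

-- ===== CLAIM (what is proved, stated in full; the proofs are below) =====
def Claim_equal_MapKind : Prop := ∀ (kind : String), Dom_MapKind kind → Spec_MapKind kind (MapKind kind)

-- ===== LEMMAS AND PROOFS =====

-- a block of c copies of p commutes with one more p
theorem flatten_replicate_comm (c : Nat) (p : List Char) :
    (List.replicate c p).flatten ++ p = p ++ (List.replicate c p).flatten := by
  induction c with
  | zero => simp
  | succ c ih => simp [List.replicate_succ, List.append_assoc] at *; rw [ih]

-- the loop's (count, base), finished off with count array markers and the lookup, is A's recursion
theorem stripLoop_finish (cs : List Char) (c : Nat) :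
    (List.replicate (stripLoop cs c).1 ['a', ':']).flatten ++ lookupB (stripLoop cs c).2
      = (List.replicate c ['a', ':']).flatten ++ mapKindAux cs := by
  induction cs, c using stripLoop.induct with
  | case1 cs c h ih =>
    rw [stripLoop, dif_pos h, mapKindAux, dif_pos h, ih,
        List.replicate_succ, List.flatten_cons, List.append_assoc]
    conv_lhs => rw [← List.append_assoc, ← flatten_replicate_comm, List.append_assoc]
  | case2 cs c h =>
    rw [stripLoop, dif_neg h, mapKindAux, dif_neg h]
    rfl

-- ===== VERDICT (by name: the statement is the Claim_ definition above) =====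
theorem MapKind_spec : Claim_equal_MapKind := by
  intro kind _
  show MapKind kind = MapKind_alt kind
  unfold MapKind MapKind_alt
  have h := stripLoop_finish kind.toList 0
  simp only [List.replicate, List.flatten_nil, List.nil_append] at h
  rw [h]
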